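-- pv_equiv track=rewrite | github.com/duxman/DUXMAN-LED-NEXT | .github/scripts/update_headers.py | _strip_existing_py_header
-- ===== SOURCE A (Python) =====
-- HEADER_MARKER = "duxman-led next"
--
-- def _strip_existing_py_header(content: str) -> str:
--     """
--     Remove consecutive leading # lines that contain HEADER_MARKER in the first one.
--     Returns the remaining content.
--     """
--     lines = content.split("\n")
--     if not lines or HEADER_MARKER not in lines[0]:
--         return content
--
--     # Consume all leading comment lines that belong to our header block
--     end = 0
--     for i, line in enumerate(lines):
--         if line.startswith("#"):
--             end = i + 1
--         else:
--             break
--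
--     rest = "\n".join(lines[end:]).lstrip("\n")
--     return rest
-- ===== SOURCE B (Python) =====
-- HEADER_MARKER = "duxman-led next"
--
--
-- def _strip_existing_py_header(content: str) -> str:
--     """Drop the leading '#'-comment block when the first line carries the marker.
--
--     Scans the raw string with a cursor instead of building a line list.
--     """
--     nl = content.find("\n")
--     first = content if nl == -1 else content[:nl]
--     if HEADER_MARKER not in first:
--         return content
--     pos = 0
--     n = len(content)
--     while pos < n and content[pos] == "#":
--         nxt = content.find("\n", pos)
--         pos = n if nxt == -1 else nxt + 1
--     while pos < n and content[pos] == "\n":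
--         pos += 1
--     return content[pos:]
-- ===== Notes on version B (the rewrite author's own statement) =====
-- stated objective: idiomatic
-- what changed: Replaces A's split-into-a-line-list / enumerate-and-count prefix / re-join pipeline by a single cursor scan over the raw string that jumps from newline to newline and slices once at the end.
import Mathlib
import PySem

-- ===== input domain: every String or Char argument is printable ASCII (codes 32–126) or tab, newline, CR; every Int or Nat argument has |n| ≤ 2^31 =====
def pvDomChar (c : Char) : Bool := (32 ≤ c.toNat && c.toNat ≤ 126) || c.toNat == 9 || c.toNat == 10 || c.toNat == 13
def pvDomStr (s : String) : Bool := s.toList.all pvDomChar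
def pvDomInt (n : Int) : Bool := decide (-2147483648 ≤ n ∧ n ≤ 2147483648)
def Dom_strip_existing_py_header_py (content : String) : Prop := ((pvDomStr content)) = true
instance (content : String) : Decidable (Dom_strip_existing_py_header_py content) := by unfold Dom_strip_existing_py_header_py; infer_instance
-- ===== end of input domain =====

-- B replaces A's split-into-lines / count-prefix / re-join pipeline by a single cursor scan over
-- the raw string (idiomatic single pass, no intermediate line list); return values are identical.

def HEADER_MARKER : List Char := "duxman-led next".toList

-- ===== PORT A =====
-- the 'for i, line in enumerate(lines): if line.startswith("#"): end = i+1 else: break' loop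
def headerEnd : List (List Char) → Nat
  | [] => 0
  | l :: ls => if PySem.Chars.startswith l ['#'] then headerEnd ls + 1 else 0

def strip_existing_py_header_py (content : String) : String :=
  let lines := PySem.Chars.splitOn content.toList ['\n']
  if lines.isEmpty || !(PySem.Chars.isIn HEADER_MARKER (lines.headD [])) then content
  else
    let e := headerEnd lines
    -- '"\n".join(lines[end:]).lstrip("\n")'; .lstrip("\n") is exactly dropping leading '\n' chars
    String.ofList (List.dropWhile (fun c => c == '\n')
      (PySem.Chars.join ['\n'] (lines.drop e)))

-- ===== PORT B =====
-- 'nxt = content.find("\n", pos); pos = n if nxt == -1 else nxt + 1' : drop through the next newline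
def dropThroughNl : List Char → List Char
  | [] => []
  | c :: rest => if c = '\n' then rest else dropThroughNl rest

theorem length_dropThroughNl_le (l : List Char) : (dropThroughNl l).length ≤ l.length := by
  induction l with
  | nil => simp [dropThroughNl]
  | cons c rest ih => by_cases h : c = '\n' <;> simp [dropThroughNl, h] <;> omega

-- 'while pos < n and content[pos] == "#": …'
def skipHashLines : List Char → List Char
  | [] => []
  | c :: rest =>
      if c = '#' then skipHashLines (dropThroughNl rest) else c :: rest
termination_by l => l.length
decreasing_by
  have := length_dropThroughNl_le rest; simp; omega

-- 'while pos < n and content[pos] == "\n": pos += 1'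
def skipNewlines : List Char → List Char
  | [] => []
  | c :: rest => if c = '\n' then skipNewlines rest else c :: rest

def strip_existing_py_header_py_alt (content : String) : String :=
  let cs := content.toList
  let nl := PySem.Chars.find cs ['\n']
  let first := if nl = -1 then cs else PySem.List.slice cs none (some nl)
  if !(PySem.Chars.isIn HEADER_MARKER first) then content
  else String.ofList (skipNewlines (skipHashLines cs))

-- ===== PRECONDITION & SPEC =====
def Spec_strip_existing_py_header_py (content : String) (out : String) : Prop := out = strip_existing_py_header_py_alt content
instance (content : String) (out : String) : Decidable (Spec_strip_existing_py_header_py content out) := by unfold Spec_strip_existing_py_header_py; infer_instance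

-- ===== CLAIM (what is proved, stated in full; the proofs are below) =====
def Claim_equal_strip_existing_py_header_py : Prop := ∀ (content : String), Dom_strip_existing_py_header_py content → Spec_strip_existing_py_header_py content (strip_existing_py_header_py content)

-- ===== LEMMAS AND PROOFS =====

-- reference single-char split: splitNl cs = cs.split("\n")
def splitNl : List Char → List (List Char)
  | [] => [[]]
  | c :: cs =>
      if c = '\n' then [] :: splitNl cs
      else match splitNl cs with
        | l :: ls => (c :: l) :: ls
        | [] => [[c]]

theorem splitNl_ne_nil (cs : List Char) : splitNl cs ≠ [] := by
  cases cs with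
  | nil => simp [splitNl]
  | cons c cs =>
      by_cases h : c = '\n'
      · simp [splitNl, h]
      · simp only [splitNl, if_neg h]
        cases splitNl cs <;> simp

def mapHead (f : List Char → List Char) : List (List Char) → List (List Char)
  | [] => []
  | l :: ls => f l :: ls

theorem splitOn_go_spec (fuel : Nat) (l cur : List Char) (acc : List (List Char))
    (h : l.length < fuel) :
    PySem.Chars.splitOn.go ['\n'] fuel l cur acc
      = acc.reverse ++ mapHead (cur.reverse ++ ·) (splitNl l) := by
  induction fuel generalizing l cur acc with
  | zero => omega
  | succ fuel ih =>
      cases l with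
      | nil =>
          rw [PySem.Chars.splitOn.go]
          · simp [splitNl, mapHead]
          · omega
      | cons c rest =>
          rw [PySem.Chars.splitOn.go]
          by_cases hc : c = '\n'
          · subst hc
            have hp : ['\n'].isPrefixOf ('\n' :: rest) = true := by simp
            rw [if_pos hp]
            simp only [List.length, List.drop_succ_cons, List.drop_zero]
            rw [ih rest [] _ (by simp at h ⊢; omega)]
            obtain ⟨hd, tl, heq⟩ := List.exists_cons_of_ne_nil (splitNl_ne_nil rest)
            simp [splitNl, heq, mapHead]
          · have hp : ['\n'].isPrefixOf (c :: rest) = false := by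
              simp [List.isPrefixOf]; intro hc'; exact absurd hc'.symm hc
            rw [if_neg (by simp [hp])]
            rw [ih rest (c :: cur) acc (by simp at h ⊢; omega)]
            obtain ⟨hd, tl, heq⟩ := List.exists_cons_of_ne_nil (splitNl_ne_nil rest)
            simp [splitNl, if_neg hc, heq, mapHead]

theorem splitOn_eq_splitNl (cs : List Char) :
    PySem.Chars.splitOn cs ['\n'] = splitNl cs := by
  unfold PySem.Chars.splitOn
  rw [splitOn_go_spec cs.length.succ cs [] [] (by omega)]
  obtain ⟨hd, tl, heq⟩ := List.exists_cons_of_ne_nil (splitNl_ne_nil cs)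
  simp [heq, mapHead]

theorem splitNl_of_not_mem (cs : List Char) (h : '\n' ∉ cs) : splitNl cs = [cs] := by
  induction cs with
  | nil => simp [splitNl]
  | cons c rest ih =>
      have hc : c ≠ '\n' := fun hc => h (by simp [hc])
      have := ih (fun hm => h (List.mem_cons_of_mem _ hm))
      simp [splitNl, if_neg hc, this]

theorem splitNl_of_mem (cs : List Char) (h : '\n' ∈ cs) :
    splitNl cs = cs.takeWhile (fun c => !(c == '\n'))
      :: splitNl ((cs.dropWhile (fun c => !(c == '\n'))).tail) := by
  induction cs with
  | nil => simp at h
  | cons c rest ih =>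
      by_cases hc : c = '\n'
      · subst hc; simp [splitNl, List.takeWhile_cons, List.dropWhile_cons]
      · have hm : '\n' ∈ rest := by
          rcases List.mem_cons.mp h with h' | h'
          · exact absurd h'.symm hc
          · exact h'
        simp only [splitNl, if_neg hc, ih hm]
        simp [List.takeWhile_cons, List.dropWhile_cons, hc]

theorem headD_splitNl (cs : List Char) :
    (splitNl cs).headD [] = cs.takeWhile (fun c => !(c == '\n')) := by
  by_cases h : '\n' ∈ cs
  · rw [splitNl_of_mem cs h]; rfl
  · rw [splitNl_of_not_mem cs h]
    have : cs.takeWhile (fun c => !(c == '\n')) = cs :=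
      List.takeWhile_eq_self_iff.mpr (by
        intro c hc
        simp only [Bool.not_eq_eq_eq_not, Bool.not_true, beq_eq_false_iff_ne]
        exact fun hcc => h (hcc ▸ hc))
    simp [this]

theorem join_splitNl (cs : List Char) : PySem.Chars.join ['\n'] (splitNl cs) = cs := by
  induction cs with
  | nil => simp [splitNl, PySem.Chars.join_singleton]
  | cons c rest ih =>
      obtain ⟨hd, tl, heq⟩ := List.exists_cons_of_ne_nil (splitNl_ne_nil rest)
      by_cases hc : c = '\n'
      · subst hc
        rw [show splitNl ('\n' :: rest) = [] :: splitNl rest from by simp [splitNl], heq,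
          PySem.Chars.join_cons_cons, ← heq, ih]
        rfl
      · simp only [splitNl, if_neg hc, heq]
        cases tl with
        | nil =>
            rw [PySem.Chars.join_singleton]
            rw [heq, PySem.Chars.join_singleton] at ih
            simp [ih]
        | cons t ts =>
            rw [PySem.Chars.join_cons_cons]
            rw [heq, PySem.Chars.join_cons_cons] at ih
            rw [← ih]
            simp

theorem dropThroughNl_eq (l : List Char) :
    dropThroughNl l = (l.dropWhile (fun c => !(c == '\n'))).tail := by
  induction l with
  | nil => simp [dropThroughNl]
  | cons c rest ih =>
      by_cases hc : c = '\n'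
      · subst hc; simp [dropThroughNl, List.dropWhile_cons]
      · simp [dropThroughNl, hc, List.dropWhile_cons, ih]

theorem skipNewlines_eq (l : List Char) :
    skipNewlines l = l.dropWhile (fun c => c == '\n') := by
  induction l with
  | nil => simp [skipNewlines]
  | cons c rest ih =>
      by_cases hc : c = '\n'
      · subst hc; simp [skipNewlines, List.dropWhile_cons, ih]
      · simp [skipNewlines, hc, List.dropWhile_cons]

theorem startswith_takeWhile_not_hash (c : Char) (rest : List Char) (hc : c ≠ '#') :
    PySem.Chars.startswith ((c :: rest).takeWhile (fun c => !(c == '\n'))) ['#'] = false := by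
  by_cases hn : c = '\n'
  · subst hn; simp [List.takeWhile_cons, PySem.Chars.startswith, List.isPrefixOf]
  · simp [List.takeWhile_cons, hn, PySem.Chars.startswith, List.isPrefixOf]
    exact fun h => hc h.symm

theorem join_drop_headerEnd_bounded (n : Nat) : ∀ (cs : List Char), cs.length ≤ n →
    PySem.Chars.join ['\n'] ((splitNl cs).drop (headerEnd (splitNl cs))) = skipHashLines cs := by
  induction n with
  | zero =>
      intro cs hlen
      have : cs = [] := List.eq_nil_of_length_eq_zero (by omega)
      subst this
      simp [splitNl, headerEnd, PySem.Chars.startswith, List.isPrefixOf,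
        PySem.Chars.join_singleton, skipHashLines]
  | succ n ih =>
      intro cs hlen
      cases cs with
      | nil =>
          simp [splitNl, headerEnd, PySem.Chars.startswith, List.isPrefixOf,
            PySem.Chars.join_singleton, skipHashLines]
      | cons c rest =>
          by_cases hc : c = '#'
          · subst hc
            by_cases hm : '\n' ∈ ('#' :: rest)
            · have hmr : '\n' ∈ rest := by
                rcases List.mem_cons.mp hm with h' | h'
                · exact absurd h'.symm (by decide)
                · exact h'
              rw [splitNl_of_mem _ hm]
              have hsw : PySem.Chars.startswith
                  (('#' :: rest).takeWhile (fun c => !(c == '\n'))) ['#'] = true := by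
                simp [List.takeWhile_cons, PySem.Chars.startswith, List.isPrefixOf]
              simp only [headerEnd, hsw, if_true, List.drop_succ_cons]
              have htail : (('#' :: rest).dropWhile (fun c => !(c == '\n'))).tail
                  = (rest.dropWhile (fun c => !(c == '\n'))).tail := by
                simp [List.dropWhile_cons]
              rw [htail]
              have hlt : ((rest.dropWhile (fun c => !(c == '\n'))).tail).length ≤ n := by
                have h1 := List.length_tail (l := rest.dropWhile (fun c => !(c == '\n')))
                have h2 := List.length_dropWhile_le (fun c => !(c == '\n')) rest
                simp at hlen ⊢; omega
              rw [ih _ hlt]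
              show _ = skipHashLines ('#' :: rest)
              rw [skipHashLines, if_pos rfl, dropThroughNl_eq]
            · have hmr : '\n' ∉ rest := fun h => hm (List.mem_cons_of_mem _ h)
              rw [splitNl_of_not_mem _ hm]
              have hsw : PySem.Chars.startswith ('#' :: rest) ['#'] = true := by
                simp [PySem.Chars.startswith, List.isPrefixOf]
              simp only [headerEnd, hsw, if_true, List.drop_succ_cons, List.drop_nil]
              rw [PySem.Chars.join_nil]
              show _ = skipHashLines ('#' :: rest)
              rw [skipHashLines, if_pos rfl, dropThroughNl_eq]
              have : rest.dropWhile (fun c => !(c == '\n')) = [] := by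
                rw [List.dropWhile_eq_nil_iff]
                intro c hcm
                simp only [Bool.not_eq_eq_eq_not, Bool.not_true, beq_eq_false_iff_ne]
                exact fun hcc => hmr (hcc ▸ hcm)
              simp [this, skipHashLines]
          · obtain ⟨hd, tl, heq⟩ := List.exists_cons_of_ne_nil (splitNl_ne_nil (c :: rest))
            have hhd : hd = (c :: rest).takeWhile (fun c => !(c == '\n')) := by
              have := headD_splitNl (c :: rest); rw [heq] at this; simpa using this
            have hsw : PySem.Chars.startswith hd ['#'] = false := by
              rw [hhd]; exact startswith_takeWhile_not_hash c rest hc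
            rw [heq]
            simp only [headerEnd, hsw, Bool.false_eq_true, if_false, List.drop_zero]
            rw [← heq, join_splitNl]
            rw [skipHashLines, if_neg hc]

theorem join_drop_headerEnd (cs : List Char) :
    PySem.Chars.join ['\n'] ((splitNl cs).drop (headerEnd (splitNl cs))) = skipHashLines cs := by
  exact join_drop_headerEnd_bounded cs.length cs le_rfl

theorem take_eq_takeWhile_of_first (cs : List Char) (n : Nat)
    (hn : cs.drop n ≠ [] ∧ (cs.drop n).headD ' ' = '\n')
    (hmin : ∀ i, i < n → ∀ (h : i < cs.length), cs[i] ≠ '\n') :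
    cs.take n = cs.takeWhile (fun c => !(c == '\n')) := by
  induction cs generalizing n with
  | nil => simp at hn
  | cons c rest ih =>
      cases n with
      | zero =>
          simp only [List.drop_zero] at hn
          have hc : c = '\n' := by simpa using hn.2
          simp [List.takeWhile_cons, hc]
      | succ n =>
          have hc : c ≠ '\n' := by
            have := hmin 0 (by omega) (by simp)
            simpa using this
          simp only [List.take_succ_cons, List.takeWhile_cons]
          rw [if_pos (by simp [hc])]
          congr 1
          refine ih n (by simpa using hn) ?_
          intro i hi h
          have := hmin (i+1) (by omega) (by simpa using h)
          simpa using this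

theorem firstB_eq (cs : List Char) :
    (if PySem.Chars.find cs ['\n'] = -1 then cs
     else PySem.List.slice cs none (some (PySem.Chars.find cs ['\n'])))
      = cs.takeWhile (fun c => !(c == '\n')) := by
  by_cases h : '\n' ∈ cs
  · have hne : PySem.Chars.find cs ['\n'] ≠ -1 :=
      (PySem.Chars.find_ne_neg_one_iff cs ['\n']).mpr ((List.singleton_infix_iff _ _).mpr h)
    have hnn : 0 ≤ PySem.Chars.find cs ['\n'] :=
      (PySem.Chars.find_nonneg_iff cs ['\n']).mpr ((List.singleton_infix_iff _ _).mpr h)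
    rw [if_neg hne]
    obtain ⟨hpre, hmin⟩ := PySem.Chars.find_spec (s := cs) (sub := ['\n']) hnn
    set n := (PySem.Chars.find cs ['\n']).toNat with hn
    have hcast : PySem.Chars.find cs ['\n'] = (n : Int) := by omega
    rw [hcast, PySem.List.slice_to_natCast]
    apply take_eq_takeWhile_of_first
    · rcases hpre with ⟨t, ht⟩
      constructor
      · rw [← ht]; simp
      · rw [← ht]; simp
    · intro i hi hilen
      intro hci
      refine hmin i hi ⟨cs.drop (i+1), ?_⟩
      rw [← List.getElem_cons_drop hilen, hci]
      rfl
  · have heq : PySem.Chars.find cs ['\n'] = -1 :=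
      (PySem.Chars.find_eq_neg_one_iff cs ['\n']).mpr (fun hinf => h ((List.singleton_infix_iff _ _).mp hinf))
    rw [if_pos heq]
    exact (List.takeWhile_eq_self_iff.mpr (by
      intro c hcm
      simp only [Bool.not_eq_eq_eq_not, Bool.not_true, beq_eq_false_iff_ne]
      exact fun hcc => h (hcc ▸ hcm))).symm

-- ===== VERDICT (by name: the statement is the Claim_ definition above) =====
theorem strip_existing_py_header_py_spec : Claim_equal_strip_existing_py_header_py := by
  intro content _
  unfold Spec_strip_existing_py_header_py strip_existing_py_header_py strip_existing_py_header_py_alt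
  have hne : (splitNl content.toList).isEmpty = false := by
    simp [List.isEmpty_iff, splitNl_ne_nil content.toList]
  simp only [splitOn_eq_splitNl, firstB_eq, headD_splitNl, skipNewlines_eq,
    join_drop_headerEnd, hne, Bool.false_or]
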